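-- pv_equiv track=rewrite | github.com/Bean-Pringles/The-Engine | Projects/rachet/rachet/gears.py | parse_compression_args
-- ===== SOURCE A (Python) =====
-- def parse_compression_args(args):
--     """Parse compression-related arguments."""
--     files = []
--     noreplace = False
--     to_txt = False
--
--     for arg in args:
--         if arg == "--noreplace":
--             noreplace = True
--         elif arg == "--txt":
--             to_txt = True
--         else:
--             files.append(arg)
--
--     return files, noreplace, to_txt
-- ===== SOURCE B (Python) =====
-- def parse_compression_args(args):
--     """Parse compression-related arguments."""
--     noreplace = "--noreplace" in args
--     to_txt = "--txt" in args
--     files = [a for a in args if a not in ("--noreplace", "--txt")]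
--     return files, noreplace, to_txt
-- ===== Notes on version B (the rewrite author's own statement) =====
-- stated objective: idiomatic
-- what changed: Replaced the single fused accumulation loop with three independent declarative passes: two membership tests for the flags and one filtering comprehension for the file list.
import Mathlib
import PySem

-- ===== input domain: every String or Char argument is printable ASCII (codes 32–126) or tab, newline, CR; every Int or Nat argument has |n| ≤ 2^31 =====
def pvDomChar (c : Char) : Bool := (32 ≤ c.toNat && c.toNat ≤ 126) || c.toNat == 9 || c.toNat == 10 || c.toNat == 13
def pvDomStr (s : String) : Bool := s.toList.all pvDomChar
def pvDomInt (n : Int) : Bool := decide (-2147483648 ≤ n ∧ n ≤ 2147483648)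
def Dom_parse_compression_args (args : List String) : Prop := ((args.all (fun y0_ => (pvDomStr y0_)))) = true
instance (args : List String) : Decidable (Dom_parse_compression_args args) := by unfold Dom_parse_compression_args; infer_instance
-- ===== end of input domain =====

-- B replaces A's single fused loop by three independent passes (two membership tests and one filter); idiomatic, same O(n) cost.

-- ===== PORT A =====
-- A: one loop over args, carrying (files, noreplace, to_txt) as state.
def parse_compression_args (args : List String) : List String × Bool × Bool :=
  let s := args.foldl
    (fun (st : List String × Bool × Bool) arg =>
      if arg = "--noreplace" then (st.1, true, st.2.2)
      else if arg = "--txt" then (st.1, st.2.1, true)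
      else (st.1 ++ [arg], st.2.1, st.2.2))
    ([], false, false)
  s

-- ===== PORT B =====
-- B: three separate computations over the same list.
def parse_compression_args_alt (args : List String) : List String × Bool × Bool :=
  let noreplace := args.contains "--noreplace"
  let to_txt := args.contains "--txt"
  let files := args.filter (fun a => ¬ (a = "--noreplace" ∨ a = "--txt"))
  (files, noreplace, to_txt)

-- ===== PRECONDITION & SPEC =====
def Spec_parse_compression_args (args : List String) (out : List String × Bool × Bool) : Prop := out = parse_compression_args_alt args
instance (args : List String) (out : List String × Bool × Bool) : Decidable (Spec_parse_compression_args args out) := by unfold Spec_parse_compression_args; infer_instance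

-- ===== CLAIM (what is proved, stated in full; the proofs are below) =====
def Claim_equal_parse_compression_args : Prop := ∀ (args : List String), Dom_parse_compression_args args → Spec_parse_compression_args args (parse_compression_args args)

-- ===== LEMMAS AND PROOFS =====

-- Loop invariant: folding from state (fs, nr, tx) yields B's answers combined with the carried state.
lemma parse_loop_inv (args : List String) (fs : List String) (nr tx : Bool) :
    args.foldl
      (fun (st : List String × Bool × Bool) arg =>
        if arg = "--noreplace" then (st.1, true, st.2.2)
        else if arg = "--txt" then (st.1, st.2.1, true)
        else (st.1 ++ [arg], st.2.1, st.2.2))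
      (fs, nr, tx)
    = (fs ++ args.filter (fun a => ¬ (a = "--noreplace" ∨ a = "--txt")),
       nr || args.contains "--noreplace",
       tx || args.contains "--txt") := by
  induction args generalizing fs nr tx with
  | nil => simp
  | cons a rest ih =>
    simp only [List.foldl_cons]
    by_cases h1 : a = "--noreplace"
    · subst h1
      rw [if_pos rfl, ih]
      simp
    · rw [if_neg h1]
      by_cases h2 : a = "--txt"
      · subst h2
        rw [if_pos rfl, ih]
        simp [h1]
      · rw [if_neg h2, ih]
        simp [h1, h2, Ne.symm h1, Ne.symm h2]

-- ===== VERDICT (by name: the statement is the Claim_ definition above) =====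
theorem parse_compression_args_spec : Claim_equal_parse_compression_args := by
  intro args _
  unfold Spec_parse_compression_args parse_compression_args parse_compression_args_alt
  simp [parse_loop_inv]
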